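-- pv_equiv track=rewrite | github.com/aidiss/spinta | spinta/utils/nestedstruct.py | build_select_tree
-- ===== SOURCE A (Python) =====
-- from typing import Dict
-- from typing import List
-- from typing import Optional
-- from typing import Set
--
-- def build_select_tree(select: List[str]) -> Dict[str, Set[Optional[str]]]:
--     tree: Dict[str, Set[Optional[str]]] = {}
--     for name in select:
--         split = name, None
--         while len(split) == 2:
--             name, node = split
--             if name not in tree:
--                 tree[name] = set()
--             if node:
--                 tree[name].add(node)
--             split = name.rsplit('.', 1)
--     return tree
-- ===== SOURCE B (Python) =====
-- from typing import Dict
-- from typing import List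
-- from typing import Optional
-- from typing import Set
--
-- def build_select_tree(select: List[str]) -> Dict[str, Set[Optional[str]]]:
--     tree: Dict[str, Set[Optional[str]]] = {}
--     for name in select:
--         parts = name.split('.')
--         n = len(parts)
--         for i in range(n, 0, -1):
--             prefix = '.'.join(parts[:i])
--             node = parts[i] if i < n else None
--             tree.setdefault(prefix, set())
--             if node:
--                 tree[prefix].add(node)
--     return tree
-- ===== Notes on version B (the rewrite author's own statement) =====
-- stated objective: alternative
-- what changed: B splits each name once into its segment list and walks prefix indices from len(parts) down to 1 with join/indexing, instead of A's while loop that repeatedly rsplits the shrinking name and threads a (name, node) pair.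
import Mathlib
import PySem

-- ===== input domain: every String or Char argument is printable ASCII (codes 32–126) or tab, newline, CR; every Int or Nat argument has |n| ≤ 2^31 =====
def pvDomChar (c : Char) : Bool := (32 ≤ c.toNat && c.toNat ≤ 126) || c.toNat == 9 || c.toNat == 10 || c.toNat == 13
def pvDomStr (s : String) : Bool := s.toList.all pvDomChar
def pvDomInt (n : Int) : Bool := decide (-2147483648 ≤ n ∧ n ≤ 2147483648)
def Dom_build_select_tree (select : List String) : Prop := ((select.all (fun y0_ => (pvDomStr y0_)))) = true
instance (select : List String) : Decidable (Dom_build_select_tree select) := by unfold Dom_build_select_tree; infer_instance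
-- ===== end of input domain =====

-- B splits each name once into its segment list and walks prefix indices downward, instead of A's repeated-rsplit while loop: an alternative decomposition with the same result.


-- ===== PORT A =====
-- hand-ported primitive: Python's name.rsplit('.', 1) — scan from the right for the LAST '.';
-- exact (the separator is non-empty, so no ValueError): [head, tail] if a '.' occurs, else [name].
def pvRsplitGo (rev suffix : List Char) : Option (List Char × List Char) :=
  match rev with
  | [] => none
  | c :: t => if c = '.' then some (t.reverse, suffix) else pvRsplitGo t (c :: suffix)

def pvRsplitDot1 (s : String) : List String :=
  match pvRsplitGo s.toList.reverse [] with
  | some (a, b) => [String.ofList a, String.ofList b]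
  | none => [s]

-- A's while loop; each rsplit strictly shortens `name`, so `name.length + 1` steps of fuel
-- always suffice (the fuel is only a totality guard, the `0` branch is unreachable).
def pvLoopAF (fuel : Nat) (tree : PySem.Dict String (PySem.Set (Option String)))
    (name : String) (node : Option String) : PySem.Dict String (PySem.Set (Option String)) :=
  match fuel with
  | 0 => tree
  | fuel + 1 =>
    let t1 := if tree.contains name then tree else tree.insert name PySem.Set.empty
    let t2 := match node with
      | none => t1
      | some s => if s == "" then t1
                  else t1.modify name PySem.Set.empty (fun v => PySem.Set.add v (some s))
    match pvRsplitDot1 name with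
    | [a, b] => pvLoopAF fuel t2 a (some b)
    | _ => t2

def pvLoopA (tree : PySem.Dict String (PySem.Set (Option String))) (name : String)
    (node : Option String) : PySem.Dict String (PySem.Set (Option String)) :=
  pvLoopAF (name.toList.length + 1) tree name node

def build_select_tree (select : List String) : List (String × List (Option String)) :=
  (select.foldl (fun tree name => pvLoopA tree name none) PySem.Dict.empty).items

-- ===== PORT B =====
def pvLoopB (tree : PySem.Dict String (PySem.Set (Option String))) (name : String) :
    PySem.Dict String (PySem.Set (Option String)) :=
  -- '.' is a non-empty separator, so split? is always `some`; getD is only a totality guard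
  let parts := (PySem.Str.split? name ".").getD [name]
  (PySem.List.pyRange (parts.length : Int) 0 (-1)).foldl (fun t i =>
    let pre := PySem.Str.join "." (PySem.List.slice parts none (some i))
    let node : Option String := if i < (parts.length : Int) then PySem.List.pyGet? parts i else none
    let t1 := t.setdefault pre PySem.Set.empty
    match node with
    | none => t1
    | some s => if s == "" then t1
                else t1.modify pre PySem.Set.empty (fun v => PySem.Set.add v (some s))) tree

def build_select_tree_alt (select : List String) : List (String × List (Option String)) :=
  (select.foldl pvLoopB PySem.Dict.empty).items

-- ===== PRECONDITION & SPEC =====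
def Spec_build_select_tree (select : List String) (out : List (String × List (Option String))) : Prop := out = build_select_tree_alt select
instance (select : List String) (out : List (String × List (Option String))) : Decidable (Spec_build_select_tree select out) := by unfold Spec_build_select_tree; infer_instance

-- ===== CLAIM (what is proved, stated in full; the proofs are below) =====
def Claim_equal_build_select_tree : Prop := ∀ (select : List String), Dom_build_select_tree select → Spec_build_select_tree select (build_select_tree select)

-- ===== LEMMAS AND PROOFS =====

-- one dict update: what both loops do for a single (prefix, node) event
def pvUpd (t : PySem.Dict String (PySem.Set (Option String))) (name : String)
    (node : Option String) : PySem.Dict String (PySem.Set (Option String)) :=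
  let t1 := if t.contains name then t else t.insert name PySem.Set.empty
  match node with
  | none => t1
  | some s => if s == "" then t1
              else t1.modify name PySem.Set.empty (fun v => PySem.Set.add v (some s))

-- the (prefix, node) events for a name whose REVERSED segment list is the first argument
def pvRevEvs : List String → Option String → List (String × Option String)
  | [], _ => []
  | q :: rest, node =>
      (PySem.Str.join "." ((q :: rest).reverse), node) :: pvRevEvs rest (some q)

def pvApply (tree : PySem.Dict String (PySem.Set (Option String)))
    (evs : List (String × Option String)) : PySem.Dict String (PySem.Set (Option String)) :=
  evs.foldl (fun t e => pvUpd t e.1 e.2) tree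

-- a simple recursive characterisation of splitting on '.'
def pvSplitDot : List Char → List (List Char)
  | [] => [[]]
  | c :: t =>
      if c = '.' then [] :: pvSplitDot t
      else match pvSplitDot t with
           | [] => [[c]]
           | p :: ps => (c :: p) :: ps

theorem pvSplitDot_ne_nil (cs : List Char) : pvSplitDot cs ≠ [] := by
  cases cs with
  | nil => simp [pvSplitDot]
  | cons c t =>
    simp only [pvSplitDot]
    split_ifs
    · simp
    · cases h : pvSplitDot t <;> simp

theorem pvSplitDot_join (cs : List Char) :
    PySem.Chars.join ['.'] (pvSplitDot cs) = cs := by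
  induction cs with
  | nil => simp [pvSplitDot, PySem.Chars.join_singleton]
  | cons c t ih =>
    simp only [pvSplitDot]
    split_ifs with hc
    · subst hc
      cases h : pvSplitDot t with
      | nil => exact absurd h (pvSplitDot_ne_nil t)
      | cons p ps =>
        rw [h] at ih
        rw [PySem.Chars.join_cons_cons, ih]
        simp
    · cases h : pvSplitDot t with
      | nil => exact absurd h (pvSplitDot_ne_nil t)
      | cons p ps =>
        rw [h] at ih
        cases ps with
        | nil => rw [PySem.Chars.join_singleton] at ih ⊢; simp [ih]
        | cons p2 ps2 =>
          rw [PySem.Chars.join_cons_cons] at ih ⊢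
          simp [← ih]

theorem pvSplitDot_dotfree (cs : List Char) : ∀ p ∈ pvSplitDot cs, '.' ∉ p := by
  induction cs with
  | nil => simp [pvSplitDot]
  | cons c t ih =>
    simp only [pvSplitDot]
    split_ifs with hc
    · intro p hp
      rcases List.mem_cons.mp hp with h | h
      · simp [h]
      · exact ih p h
    · cases h : pvSplitDot t with
      | nil => exact absurd h (pvSplitDot_ne_nil t)
      | cons p ps =>
        intro x hx
        simp only [List.mem_cons] at hx
        rcases hx with h2 | h2
        · subst h2
          intro hmem
          rcases List.mem_cons.mp hmem with h3 | h3
          · exact hc h3.symm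
          · exact ih p (by rw [h]; exact List.mem_cons_self) h3
        · exact ih x (by rw [h]; exact List.mem_cons.mpr (Or.inr h2))

theorem pvGo (fuel : Nat) : ∀ (l cur : List Char) (acc : List (List Char)), l.length < fuel →
    PySem.Chars.splitOn.go ['.'] fuel l cur acc
      = acc.reverse ++ (match pvSplitDot l with
                        | [] => [cur.reverse]
                        | p :: ps => (cur.reverse ++ p) :: ps) := by
  induction fuel with
  | zero => intro l cur acc h; omega
  | succ f ih =>
    intro l cur acc h
    cases l with
    | nil =>
      simp [PySem.Chars.splitOn.go, pvSplitDot]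
    | cons c rest =>
      by_cases hc : c = '.'
      · subst hc
        rw [show PySem.Chars.splitOn.go ['.'] (f+1) ('.' :: rest) cur acc
              = PySem.Chars.splitOn.go ['.'] f (List.drop 1 ('.' :: rest)) [] (cur.reverse :: acc) by
            simp [PySem.Chars.splitOn.go, List.isPrefixOf]]
        simp only [List.drop_succ_cons, List.drop_zero]
        rw [ih rest [] (cur.reverse :: acc) (by simpa using Nat.lt_of_succ_lt_succ (by simpa using h))]
        simp only [pvSplitDot]
        cases hs : pvSplitDot rest with
        | nil => exact absurd hs (pvSplitDot_ne_nil rest)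
        | cons p ps => simp
      · rw [show PySem.Chars.splitOn.go ['.'] (f+1) (c :: rest) cur acc
              = PySem.Chars.splitOn.go ['.'] f rest (c :: cur) acc by
            simp only [PySem.Chars.splitOn.go, List.isPrefixOf]
            rw [if_neg (by simp [Ne.symm hc])]]
        rw [ih rest (c :: cur) acc (by simpa using Nat.lt_of_succ_lt_succ (by simpa using h))]
        simp only [pvSplitDot, if_neg hc]
        cases hs : pvSplitDot rest with
        | nil => exact absurd hs (pvSplitDot_ne_nil rest)
        | cons p ps => simp

theorem pvSplitOn_eq (cs : List Char) :
    PySem.Chars.splitOn cs ['.'] = pvSplitDot cs := by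
  unfold PySem.Chars.splitOn
  rw [pvGo (cs.length + 1) cs [] [] (by omega)]
  cases hs : pvSplitDot cs with
  | nil => exact absurd hs (pvSplitDot_ne_nil cs)
  | cons p ps => simp

theorem pvParts_eq (name : String) :
    (PySem.Str.split? name ".").getD [name] = (pvSplitDot name.toList).map String.ofList := by
  have hm := PySem.Str.split?_map name "."
  have hsep : (".").toList = ['.'] := by decide
  rw [hsep] at hm
  unfold PySem.Chars.split? at hm
  rw [if_neg (by simp)] at hm
  rw [pvSplitOn_eq] at hm
  cases hsp : PySem.Str.split? name "." with
  | none => rw [hsp] at hm; simp at hm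
  | some parts =>
    rw [hsp] at hm
    simp only [Option.map_some, Option.some.injEq] at hm
    simp only [Option.getD_some]
    rw [← hm]
    simp [List.map_map, Function.comp_def]

theorem pvJoin_name (name : String) :
    PySem.Str.join "." ((pvSplitDot name.toList).map String.ofList) = name := by
  apply String.toList_inj.mp
  rw [PySem.Str.toList_join]
  have : (".").toList = ['.'] := by decide
  rw [this, List.map_map]
  have : (String.toList ∘ String.ofList) = id := by funext l; simp
  rw [this, List.map_id]
  exact pvSplitDot_join name.toList

theorem pvRsplitGo_no_dot (rev : List Char) : ∀ suf, '.' ∉ rev → pvRsplitGo rev suf = none := by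
  induction rev with
  | nil => intro suf _; rfl
  | cons c t ih =>
    intro suf h
    simp only [List.mem_cons, not_or] at h
    simp [pvRsplitGo, Ne.symm h.1, ih _ h.2]

theorem pvRsplit_no_dot (s : String) (h : '.' ∉ s.toList) : pvRsplitDot1 s = [s] := by
  unfold pvRsplitDot1
  rw [pvRsplitGo_no_dot _ _ (by simpa using h)]

theorem pvRsplitGo_found (r : List Char) : ∀ (pre suf : List Char), '.' ∉ r →
    pvRsplitGo (r ++ '.' :: pre) suf = some (pre.reverse, r.reverse ++ suf) := by
  induction r with
  | nil => intro pre suf _; simp [pvRsplitGo]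
  | cons c t ih =>
    intro pre suf h
    simp only [List.mem_cons, not_or] at h
    simp only [List.cons_append, pvRsplitGo, if_neg (Ne.symm h.1)]
    rw [ih pre (c :: suf) h.2]
    simp

theorem pvRsplit_found (s : String) (p q : List Char) (hs : s.toList = p ++ '.' :: q)
    (hq : '.' ∉ q) : pvRsplitDot1 s = [String.ofList p, String.ofList q] := by
  unfold pvRsplitDot1
  rw [hs]
  have : (p ++ '.' :: q).reverse = q.reverse ++ '.' :: p.reverse := by simp
  rw [this, pvRsplitGo_found q.reverse p.reverse [] (by simpa using hq)]
  simp

theorem pvJoin_append_singleton (ps : List String) (hne : ps ≠ []) (q : String) :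
    (PySem.Str.join "." (ps ++ [q])).toList
      = (PySem.Str.join "." ps).toList ++ '.' :: q.toList := by
  rw [PySem.Str.toList_join, PySem.Str.toList_join]
  have hsep : (".").toList = ['.'] := by decide
  rw [hsep]
  induction ps with
  | nil => exact absurd rfl hne
  | cons a t ih =>
    cases t with
    | nil => simp [PySem.Chars.join_cons_cons, PySem.Chars.join_singleton]
    | cons b t2 =>
      simp only [List.cons_append, List.map_cons]
      rw [PySem.Chars.join_cons_cons, PySem.Chars.join_cons_cons]
      have := ih (by simp)
      simpa using this

theorem pvSetdefault_eq {κ ν : Type} [BEq κ] (d : PySem.Dict κ ν) (k : κ) (v : ν) :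
    d.setdefault k v = if d.contains k then d else d.insert k v := by
  by_cases h : d.contains k <;> simp [PySem.Dict.setdefault, PySem.Dict.insert, h]

theorem pvLoopAF_eq_apply (f : Nat) : ∀ (r : List String), r ≠ [] → (∀ s ∈ r, '.' ∉ s.toList) →
    ∀ (node : Option String) (tree : PySem.Dict String (PySem.Set (Option String))),
    (PySem.Str.join "." r.reverse).toList.length < f →
    pvLoopAF f tree (PySem.Str.join "." r.reverse) node = pvApply tree (pvRevEvs r node) := by
  induction f with
  | zero => intro r _ _ node tree h; omega
  | succ f ih =>
    intro r hne hd node tree hf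
    cases r with
    | nil => exact absurd rfl hne
    | cons q rest =>
      have hdq : '.' ∉ q.toList := hd q (by simp)
      cases rest with
      | nil =>
        have hq : PySem.Str.join "." ([q].reverse) = q := by
          apply String.toList_inj.mp
          rw [PySem.Str.toList_join]
          simp [show (".").toList = ['.'] from by decide, PySem.Chars.join_singleton]
        rw [hq]
        simp only [pvLoopAF]
        rw [pvRsplit_no_dot q hdq]
        simp only [pvRevEvs, pvApply, List.foldl_cons, List.foldl_nil, List.reverse_cons,
          List.reverse_nil, List.nil_append]
        rw [show PySem.Str.join "." [q] = q from by simpa using hq]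
        simp only [pvUpd]
      | cons q2 rest2 =>
        have hrev : (q :: q2 :: rest2).reverse = (q2 :: rest2).reverse ++ [q] := by simp
        have hname : (PySem.Str.join "." ((q :: q2 :: rest2).reverse)).toList
            = (PySem.Str.join "." ((q2 :: rest2).reverse)).toList ++ '.' :: q.toList := by
          rw [hrev]; exact pvJoin_append_singleton _ (by simp) q
        have hr : pvRsplitDot1 (PySem.Str.join "." ((q :: q2 :: rest2).reverse))
            = [PySem.Str.join "." ((q2 :: rest2).reverse), q] := by
          have := pvRsplit_found _ _ _ hname hdq
          simpa only [String.ofList_toList] using this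
        simp only [pvLoopAF]
        rw [hr]
        dsimp only
        have hlen : (PySem.Str.join "." ((q2 :: rest2).reverse)).toList.length < f := by
          have h1 : (PySem.Str.join "." ((q :: q2 :: rest2).reverse)).toList.length
              = (PySem.Str.join "." ((q2 :: rest2).reverse)).toList.length + 1 + q.toList.length := by
            rw [hname]; simp; omega
          omega
        rw [ih (q2 :: rest2) (by simp) (fun s hs => hd s (by simp [List.mem_cons] at hs ⊢; tauto))
          (some q) _ hlen]
        simp only [pvRevEvs, pvApply, List.foldl_cons]
        rfl

theorem pvLoopB_fold (ps : List String) (j : Nat) (hj : j ≤ ps.length) :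
    ∀ (tree : PySem.Dict String (PySem.Set (Option String))),
    (PySem.List.pyRange (j : Int) 0 (-1)).foldl (fun t i =>
      let pre := PySem.Str.join "." (PySem.List.slice ps none (some i))
      let node : Option String := if i < (ps.length : Int) then PySem.List.pyGet? ps i else none
      let t1 := t.setdefault pre PySem.Set.empty
      match node with
      | none => t1
      | some s => if s == "" then t1
                  else t1.modify pre PySem.Set.empty (fun v => PySem.Set.add v (some s))) tree
      = pvApply tree (pvRevEvs ((ps.take j).reverse) ps[j]?) := by
  induction j with
  | zero =>
    intro tree
    rw [PySem.List.pyRange_neg_one_eq_nil (by norm_num)]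
    simp [pvRevEvs, pvApply]
  | succ j ih =>
    intro tree
    have hjlt : j < ps.length := by omega
    rw [PySem.List.pyRange_neg_one_cons (by positivity)]
    rw [show ((j+1 : Nat) : Int) - 1 = (j : Int) by push_cast; ring]
    rw [List.foldl_cons]
    have hsl : PySem.List.slice ps none (some ((j+1 : Nat) : Int)) = ps.take (j+1) := by
      rw [PySem.List.slice_to ps (by positivity)]
      simp
    have hnd : (if ((j+1 : Nat) : Int) < (ps.length : Int)
          then PySem.List.pyGet? ps ((j+1 : Nat) : Int) else none) = ps[j+1]? := by
      by_cases hlt : j + 1 < ps.length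
      · rw [if_pos (by exact_mod_cast hlt), PySem.List.pyGet?_natCast]
      · rw [if_neg (by exact_mod_cast hlt)]
        rw [List.getElem?_eq_none (by omega)]
    have hstep : (let pre := PySem.Str.join "." (PySem.List.slice ps none (some ((j+1 : Nat) : Int)))
        let node : Option String := if ((j+1 : Nat) : Int) < (ps.length : Int)
            then PySem.List.pyGet? ps ((j+1 : Nat) : Int) else none
        let t1 := tree.setdefault pre PySem.Set.empty
        match node with
        | none => t1
        | some s => if s == "" then t1
                    else t1.modify pre PySem.Set.empty (fun v => PySem.Set.add v (some s)))
        = pvUpd tree (PySem.Str.join "." (ps.take (j+1))) ps[j+1]? := by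
      simp only [hsl, hnd, pvSetdefault_eq]
      rfl
    rw [hstep, ih (by omega)]
    have htake : (ps.take (j+1)).reverse = ps[j] :: (ps.take j).reverse := by
      rw [List.take_add_one]
      simp [List.getElem?_eq_getElem hjlt]
    rw [htake]
    simp only [pvRevEvs, pvApply, List.foldl_cons]
    rw [show (ps[j] :: (ps.take j).reverse).reverse = ps.take (j+1) by
      rw [← htake, List.reverse_reverse]]
    rw [List.getElem?_eq_getElem hjlt]

theorem pvLoop_eq (tree : PySem.Dict String (PySem.Set (Option String))) (name : String) :
    pvLoopA tree name none = pvLoopB tree name := by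
  unfold pvLoopA pvLoopB
  rw [pvParts_eq name]
  rw [pvLoopB_fold _ _ (le_refl _)]
  rw [List.take_length, List.getElem?_eq_none (le_refl _)]
  have hne : ((pvSplitDot name.toList).map String.ofList).reverse ≠ [] := by
    simp
    exact pvSplitDot_ne_nil name.toList
  have hdf : ∀ s ∈ ((pvSplitDot name.toList).map String.ofList).reverse, '.' ∉ s.toList := by
    intro s hs
    rw [List.mem_reverse] at hs
    obtain ⟨p, hp, rfl⟩ := List.mem_map.mp hs
    simpa using pvSplitDot_dotfree name.toList p hp
  have hmain := pvLoopAF_eq_apply (name.toList.length + 1) _ hne hdf none tree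
    (by rw [List.reverse_reverse, pvJoin_name]; omega)
  rw [List.reverse_reverse, pvJoin_name] at hmain
  exact hmain

-- ===== VERDICT (by name: the statement is the Claim_ definition above) =====
theorem build_select_tree_spec : Claim_equal_build_select_tree := by
  intro select _
  unfold Spec_build_select_tree build_select_tree build_select_tree_alt
  rw [show (fun tree name => pvLoopA tree name none) = pvLoopB from
    funext fun t => funext fun n => pvLoop_eq t n]
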